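-- pv_equiv track=rewrite | github.com/UK-SBCoA-EbbertLab/Dark_and_Camouflaged_Genes_Pipeline | identify_dark_and_camouflaged_regions-NF/bin/filter_gff3.py | getClusterRepresentative
-- ===== SOURCE A (Python) =====
-- def getClusterRepresentative(cluster_list):
-- 	max_gene = None
-- 	max_length = 0
-- 	for region in cluster_list:
-- 		length = region[1] - region[0]
-- 		if region[2] == "gene" and length > max_length:
-- 			max_gene = region
-- 			max_length = length
--
-- 	if max_gene: return max_gene
-- 	max_region = None
-- 	for region in cluster_list:
-- 		length = region[1] - region[0]
-- 		if length > max_length: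
-- 			max_region = region
-- 			max_length = length
-- 	return max_region
-- ===== SOURCE B (Python) =====
-- def getClusterRepresentative(cluster_list):
--     best_gene = None
--     best_gene_len = 0
--     best_region = None
--     best_region_len = 0
--     for region in cluster_list:
--         length = region[1] - region[0]
--         if region[2] == "gene" and length > best_gene_len:
--             best_gene = region
--             best_gene_len = length
--         if length > best_region_len:
--             best_region = region
--             best_region_len = length
--     return best_gene if best_gene else best_region
-- ===== Notes on version B (the rewrite author's own statement) =====
-- stated objective: simpler
-- what changed: Replaces A's two sequential scans (gene pass, then conditional fallback pass) with one pass that maintains both the longest gene and the longest region simultaneously.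
import Mathlib
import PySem

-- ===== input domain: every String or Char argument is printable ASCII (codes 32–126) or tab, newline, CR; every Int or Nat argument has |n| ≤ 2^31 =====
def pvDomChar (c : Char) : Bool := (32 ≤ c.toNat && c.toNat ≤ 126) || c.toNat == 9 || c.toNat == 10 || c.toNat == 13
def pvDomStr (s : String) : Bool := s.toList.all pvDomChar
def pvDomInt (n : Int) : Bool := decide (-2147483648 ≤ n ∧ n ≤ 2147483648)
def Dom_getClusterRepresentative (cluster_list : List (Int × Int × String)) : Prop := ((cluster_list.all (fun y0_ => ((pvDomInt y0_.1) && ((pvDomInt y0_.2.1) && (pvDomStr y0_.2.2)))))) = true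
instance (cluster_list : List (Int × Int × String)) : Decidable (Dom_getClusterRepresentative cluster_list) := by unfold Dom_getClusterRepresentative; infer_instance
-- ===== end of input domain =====

-- B collapses A's two sequential scans into one pass tracking the longest gene and the longest region together; objective: simpler.

-- ===== PORT A =====
-- first loop of A: longest region of type "gene" (strict >, first maximum kept)
def pvStepGene (st : Option (Int × Int × String) × Int) (region : Int × Int × String) :
    Option (Int × Int × String) × Int :=
  let length := region.2.1 - region.1
  if region.2.2 == "gene" && decide (length > st.2) then (some region, length) else st

-- second loop of A: longest region of any type, threshold carried over
def pvStepAny (st : Option (Int × Int × String) × Int) (region : Int × Int × String) :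
    Option (Int × Int × String) × Int :=
  let length := region.2.1 - region.1
  if decide (length > st.2) then (some region, length) else st

def getClusterRepresentative (cluster_list : List (Int × Int × String)) : Option (Int × Int × String) :=
  let p := cluster_list.foldl pvStepGene (none, 0)
  match p.1 with
  | some g => some g   -- `if max_gene:` — a 3-tuple is always truthy, so this is exactly isSome
  | none => (cluster_list.foldl pvStepAny (none, p.2)).1

-- ===== PORT B =====
def getClusterRepresentative_alt (cluster_list : List (Int × Int × String)) : Option (Int × Int × String) :=
  let st := cluster_list.foldl
    (fun (st : (Option (Int × Int × String) × Int) × (Option (Int × Int × String) × Int)) region =>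
      let length := region.2.1 - region.1
      ((if region.2.2 == "gene" && decide (length > st.1.2) then (some region, length) else st.1),
       (if decide (length > st.2.2) then (some region, length) else st.2)))
    ((none, 0), (none, 0))
  match st.1.1 with
  | some g => some g
  | none => st.2.1

-- ===== PRECONDITION & SPEC =====
def Spec_getClusterRepresentative (cluster_list : List (Int × Int × String)) (out : Option (Int × Int × String)) : Prop := out = getClusterRepresentative_alt cluster_list
instance (cluster_list : List (Int × Int × String)) (out : Option (Int × Int × String)) : Decidable (Spec_getClusterRepresentative cluster_list out) := by unfold Spec_getClusterRepresentative; infer_instance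

-- ===== CLAIM (what is proved, stated in full; the proofs are below) =====
def Claim_equal_getClusterRepresentative : Prop := ∀ (cluster_list : List (Int × Int × String)), Dom_getClusterRepresentative cluster_list → Spec_getClusterRepresentative cluster_list (getClusterRepresentative cluster_list)

-- ===== LEMMAS AND PROOFS =====

-- B's fused fold is the pair of A's two folds
theorem pv_fold_split (l : List (Int × Int × String))
    (g r : Option (Int × Int × String) × Int) :
    l.foldl
      (fun (st : (Option (Int × Int × String) × Int) × (Option (Int × Int × String) × Int)) region =>
        let length := region.2.1 - region.1
        ((if region.2.2 == "gene" && decide (length > st.1.2) then (some region, length) else st.1),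
         (if decide (length > st.2.2) then (some region, length) else st.2)))
      (g, r)
    = (l.foldl pvStepGene g, l.foldl pvStepAny r) := by
  induction l generalizing g r with
  | nil => rfl
  | cons a l ih =>
    simp only [List.foldl_cons]
    rw [← ih]
    rfl

-- once the gene fold holds a `some`, it stays `some`
theorem pv_gene_some (l : List (Int × Int × String)) (x : Int × Int × String) (n : Int) :
    (l.foldl pvStepGene (some x, n)).1.isSome := by
  induction l generalizing x n with
  | nil => rfl
  | cons a l ih =>
    simp only [List.foldl_cons, pvStepGene]
    split
    · exact ih _ _
    · exact ih _ _

-- if the gene fold ends with no gene, its state is untouched (so the threshold is still 0)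
theorem pv_gene_none (l : List (Int × Int × String)) :
    (l.foldl pvStepGene ((none : Option (Int × Int × String)), (0 : Int))).1 = none →
    l.foldl pvStepGene ((none : Option (Int × Int × String)), (0 : Int)) = (none, 0) := by
  induction l with
  | nil => intro _; rfl
  | cons a l ih =>
    intro h
    simp only [List.foldl_cons, pvStepGene] at h ⊢
    by_cases hc : (a.2.2 == "gene" && decide (a.2.1 - a.1 > 0)) = true
    · rw [if_pos hc] at h
      exact absurd h (Option.isSome_iff_ne_none.mp (pv_gene_some l a _))
    · rw [if_neg hc] at h ⊢
      exact ih h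
  
-- ===== VERDICT (by name: the statement is the Claim_ definition above) =====
theorem getClusterRepresentative_spec : Claim_equal_getClusterRepresentative := by
  intro cl _
  unfold Spec_getClusterRepresentative getClusterRepresentative getClusterRepresentative_alt
  rw [pv_fold_split]
  cases hg : (cl.foldl pvStepGene ((none : Option (Int × Int × String)), (0 : Int))).1 with
  | some g => simp [hg]
  | none =>
    have h := pv_gene_none cl hg
    simp [h]
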